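-- pv_equiv track=rewrite | github.com/cesarfilhodev/planck-academy | src/backend/main.py | sse_pack
-- ===== SOURCE A (Python) =====
-- def sse_pack(data: str, event: str | None = None) -> str:
--     """Formata um evento SSE. Escapa quebras de linha como múltiplos data:."""
--     out = ""
--     if event:
--         out += f"event: {event}\n"
--     for line in data.split("\n"):
--         out += f"data: {line}\n"
--     out += "\n"
--     return out
-- ===== SOURCE B (Python) =====
-- def sse_pack(data: str, event: str | None = None) -> str:
--     """Formata um evento SSE via substituicao unica, sem loop por linha."""
--     prefix = f"event: {event}\n" if event else ""
--     return prefix + "data: " + data.replace("\n", "\ndata: ") + "\n\n"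
-- ===== Notes on version B (the rewrite author's own statement) =====
-- stated objective: simpler
-- what changed: The per-line split-and-loop accumulation is replaced by one string substitution that inserts a fresh data-field prefix after every newline, so no list of lines and no loop is maintained.
import Mathlib
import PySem

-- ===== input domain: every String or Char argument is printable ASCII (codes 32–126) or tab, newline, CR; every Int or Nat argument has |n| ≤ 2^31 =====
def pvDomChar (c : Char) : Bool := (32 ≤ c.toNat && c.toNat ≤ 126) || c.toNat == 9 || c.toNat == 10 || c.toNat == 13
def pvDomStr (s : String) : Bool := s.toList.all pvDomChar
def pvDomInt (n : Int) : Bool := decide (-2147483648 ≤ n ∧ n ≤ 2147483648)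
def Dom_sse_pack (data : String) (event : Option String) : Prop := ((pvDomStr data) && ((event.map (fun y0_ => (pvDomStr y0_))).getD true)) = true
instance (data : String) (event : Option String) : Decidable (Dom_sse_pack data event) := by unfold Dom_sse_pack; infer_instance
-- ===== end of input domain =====

-- B drops A's split+per-line loop and builds the data section by one substitution; objective: simpler.

-- ===== PORT A =====
-- out = ""; if event: out += "event: "+event+"\n"; for line in data.split("\n"): out += "data: "+line+"\n"; out += "\n"
def sse_pack (data : String) (event : Option String) : String :=
  let out : List Char := []
  let out : List Char :=
    match event with
    | some e => if e.toList.isEmpty then out else out ++ ("event: ".toList ++ e.toList ++ ['\n'])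
    | none => out
  let out : List Char :=
    (PySem.Chars.splitOn data.toList ['\n']).foldl
      (fun out line => out ++ ("data: ".toList ++ line ++ ['\n'])) out
  String.ofList (out ++ ['\n'])

-- ===== PORT B =====
-- prefix = f"event: {event}\n" if event else ""; return prefix + "data: " + data.replace("\n", "\ndata: ") + "\n\n"
def sse_pack_alt (data : String) (event : Option String) : String :=
  let pre : List Char :=
    match event with
    | some e => if e.toList.isEmpty then [] else "event: ".toList ++ e.toList ++ ['\n']
    | none => []
  String.ofList (pre ++ "data: ".toList ++
    PySem.Chars.replace data.toList ['\n'] ('\n' :: "data: ".toList) ++ ['\n', '\n'])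

-- ===== PRECONDITION & SPEC =====
def Spec_sse_pack (data : String) (event : Option String) (out : String) : Prop := out = sse_pack_alt data event
instance (data : String) (event : Option String) (out : String) : Decidable (Spec_sse_pack data event out) := by unfold Spec_sse_pack; infer_instance

-- ===== CLAIM (what is proved, stated in full; the proofs are below) =====
def Claim_equal_sse_pack : Prop := ∀ (data : String) (event : Option String), Dom_sse_pack data event → Spec_sse_pack data event (sse_pack data event)

-- ===== LEMMAS AND PROOFS =====

-- intercalate over a cons with a nonempty tail
lemma inter_cons (sep x : List Char) (ys : List (List Char)) (h : ys ≠ []) :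
    List.intercalate sep (x :: ys) = x ++ sep ++ List.intercalate sep ys := by
  cases ys with
  | nil => exact absurd rfl h
  | cons b t => simp [List.intercalate, List.intersperse]

-- appending one more piece at the end
lemma inter_snoc (sep w : List Char) (zs : List (List Char)) (h : zs ≠ []) :
    List.intercalate sep (zs ++ [w]) = List.intercalate sep zs ++ sep ++ w := by
  induction zs with
  | nil => exact absurd rfl h
  | cons a t ih =>
    cases t with
    | nil => simp [List.intercalate]
    | cons b r =>
      rw [List.cons_append, inter_cons sep a ((b :: r) ++ [w]) (by simp),
          inter_cons sep a (b :: r) (by simp), ih (by simp)]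
      simp

-- extending the last piece
lemma inter_ext (sep : List Char) (xs : List (List Char)) (y z : List Char) :
    List.intercalate sep (xs ++ [y ++ z]) = List.intercalate sep (xs ++ [y]) ++ z := by
  cases xs with
  | nil => simp [List.intercalate]
  | cons a t =>
    rw [inter_snoc sep (y ++ z) (a :: t) (by simp), inter_snoc sep y (a :: t) (by simp)]
    simp

-- unfolding the fueled helpers
lemma replace_go_nil (old nw acc : List Char) (a : Nat) :
    PySem.Chars.replace.go old nw a [] acc = acc.reverse := by
  cases a <;> rw [PySem.Chars.replace.go] <;> simp

lemma replace_go_cons (old nw : List Char) (c : Char) (t acc : List Char) (a : Nat) :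
    PySem.Chars.replace.go old nw (a+1) (c :: t) acc =
      if old.isPrefixOf (c :: t) then PySem.Chars.replace.go old nw a (List.drop old.length (c :: t)) (nw.reverse ++ acc)
      else PySem.Chars.replace.go old nw a t (c :: acc) := by
  rw [PySem.Chars.replace.go]

lemma splitOn_go_nil (old cur : List Char) (acc : List (List Char)) (b : Nat) :
    PySem.Chars.splitOn.go old b [] cur acc = (cur.reverse :: acc).reverse := by
  cases b <;> rw [PySem.Chars.splitOn.go] <;> simp

lemma splitOn_go_cons (old : List Char) (c : Char) (t cur : List Char) (acc : List (List Char)) (b : Nat) :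
    PySem.Chars.splitOn.go old (b+1) (c :: t) cur acc =
      if old.isPrefixOf (c :: t) then PySem.Chars.splitOn.go old b (List.drop old.length (c :: t)) [] (cur.reverse :: acc)
      else PySem.Chars.splitOn.go old b t (c :: cur) acc := by
  rw [PySem.Chars.splitOn.go]

-- the split result is never empty
lemma splitOn_go_ne_nil (old : List Char) : ∀ (b : Nat) (l cur : List Char) (acc : List (List Char)),
    PySem.Chars.splitOn.go old b l cur acc ≠ [] := by
  intro b
  induction b with
  | zero => intro l cur acc; cases l <;> rw [PySem.Chars.splitOn.go] <;> simp
  | succ b ih =>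
    intro l cur acc
    cases l with
    | nil => rw [splitOn_go_nil]; simp
    | cons c t =>
      rw [splitOn_go_cons]
      split_ifs <;> apply ih

-- core: replace's accumulator tracks the intercalation of splitOn's accumulators
lemma go_rel (old nw : List Char) (hold : old ≠ []) :
    ∀ (n : Nat) (l : List Char), l.length ≤ n → ∀ (f1 f2 : Nat), l.length ≤ f1 → l.length ≤ f2 →
    ∀ (cur : List Char) (accP : List (List Char)),
    PySem.Chars.replace.go old nw f1 l (List.intercalate nw (accP.reverse ++ [cur.reverse])).reverse
      = List.intercalate nw (PySem.Chars.splitOn.go old f2 l cur accP) := by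
  intro n
  induction n with
  | zero =>
    intro l hl f1 f2 _ _ cur accP
    have : l = [] := List.eq_nil_of_length_eq_zero (Nat.le_zero.mp hl)
    subst this
    rw [replace_go_nil, splitOn_go_nil]
    simp
  | succ m ih =>
    intro l hl f1 f2 hf1 hf2 cur accP
    cases l with
    | nil => rw [replace_go_nil, splitOn_go_nil]; simp
    | cons c t =>
      have h1f1 : 1 ≤ f1 := le_trans (by simp) hf1
      have h1f2 : 1 ≤ f2 := le_trans (by simp) hf2
      obtain ⟨a, rfl⟩ : ∃ a, f1 = a + 1 := ⟨f1 - 1, by omega⟩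
      obtain ⟨b, rfl⟩ : ∃ b, f2 = b + 1 := ⟨f2 - 1, by omega⟩
      rw [replace_go_cons, splitOn_go_cons]
      split_ifs with hpre
      · -- separator matched: start a new piece
        have hlen : 1 ≤ old.length := by cases old with | nil => exact absurd rfl hold | cons _ _ => simp
        have hlL : t.length + 1 ≤ m + 1 := by simpa using hl
        have hf1' : t.length + 1 ≤ a + 1 := by simpa using hf1
        have hf2' : t.length + 1 ≤ b + 1 := by simpa using hf2
        have hdl : (List.drop old.length (c :: t)).length = t.length + 1 - old.length := by simp
        have hdrop : (List.drop old.length (c :: t)).length ≤ m := by omega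
        have hacc : nw.reverse ++ (List.intercalate nw (accP.reverse ++ [cur.reverse])).reverse
            = (List.intercalate nw ((cur.reverse :: accP).reverse ++ [([] : List Char).reverse])).reverse := by
          have : (cur.reverse :: accP).reverse = accP.reverse ++ [cur.reverse] := by simp
          rw [this, List.reverse_nil,
              inter_snoc nw [] (accP.reverse ++ [cur.reverse]) (by simp)]
          simp
        rw [hacc, ih _ hdrop a b (by omega) (by omega)]
      · -- ordinary character: extend the current piece
        have ht : t.length ≤ m := by simpa using hl
        have ht1 : t.length ≤ a := by simpa using hf1
        have ht2 : t.length ≤ b := by simpa using hf2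
        have hacc : c :: (List.intercalate nw (accP.reverse ++ [cur.reverse])).reverse
            = (List.intercalate nw (accP.reverse ++ [(c :: cur).reverse])).reverse := by
          have : (c :: cur).reverse = cur.reverse ++ [c] := by simp
          rw [this, inter_ext nw accP.reverse cur.reverse [c]]
          simp
        rw [hacc, ih _ ht a b ht1 ht2]

-- replace with a nonempty pattern equals intercalating the split pieces
lemma replace_eq_inter (s old nw : List Char) (hold : old ≠ []) :
    PySem.Chars.replace s old nw = List.intercalate nw (PySem.Chars.splitOn s old) := by
  unfold PySem.Chars.replace PySem.Chars.splitOn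
  have hold' : old.isEmpty = false := by cases old with | nil => exact absurd rfl hold | cons _ _ => simp
  rw [hold']
  simp only [Bool.false_eq_true, if_false]
  have := go_rel old nw hold s.length s (le_refl _) s.length (s.length + 1) (le_refl _) (by omega) [] []
  simpa [List.intercalate] using this

-- the per-line accumulation as a flatten of mapped pieces
lemma foldl_pieces (D : List Char) (parts : List (List Char)) (acc : List Char) :
    parts.foldl (fun out l => out ++ (D ++ l ++ ['\n'])) acc
      = acc ++ (parts.map (fun l => D ++ l ++ ['\n'])).flatten := by
  induction parts generalizing acc with
  | nil => simp
  | cons p t ih => rw [List.foldl_cons, ih]; simp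

-- the flattened pieces for a nonempty list of parts
lemma flatten_pieces (D : List Char) (parts : List (List Char)) (h : parts ≠ []) :
    (parts.map (fun l => D ++ l ++ ['\n'])).flatten
      = D ++ List.intercalate ('\n' :: D) parts ++ ['\n'] := by
  induction parts with
  | nil => exact absurd rfl h
  | cons p t ih =>
    cases t with
    | nil => simp [List.intercalate]
    | cons b r =>
      rw [List.map_cons, List.flatten_cons, ih (by simp),
          inter_cons ('\n' :: D) p (b :: r) (by simp)]
      simp

-- ===== VERDICT (by name: the statement is the Claim_ definition above) =====
theorem sse_pack_spec : Claim_equal_sse_pack := by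
  intro data event _
  unfold Spec_sse_pack sse_pack sse_pack_alt
  dsimp only
  have hparts : PySem.Chars.splitOn data.toList ['\n'] ≠ [] := by
    unfold PySem.Chars.splitOn
    exact splitOn_go_ne_nil _ _ _ _ _
  rw [foldl_pieces, flatten_pieces _ _ hparts,
      replace_eq_inter data.toList ['\n'] ('\n' :: "data: ".toList) (by simp)]
  congr 1
  cases event with
  | none => simp
  | some e =>
    by_cases he : e.toList.isEmpty <;> simp [he]
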